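-- pv_equiv track=rewrite | github.com/sora81dev/Contest | ARC172/c.py | count_vote_sequences
-- ===== SOURCE A (Python) =====
-- def count_vote_sequences(N, votes):
--     count_A = 0  # A 候補の獲得票数
--     count_B = 0  # B 候補の獲得票数
--     result = 1   # 開票結果の列としてあり得るものの数
--
--     for i in range(1, N):
--         if votes[i - 1] == 'A':
--             count_A += 1
--         else:
--             count_B += 1
--
--         # A 候補と B 候補の獲得票数が同数になる場合
--         if count_A == count_B:
--             result += 1
--
--     return result
-- ===== SOURCE B (Python) =====
-- def count_vote_sequences(N, votes):
--     # Brute force: test each prefix independently by recounting 'A' in it.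
--     return 1 + sum(1 for i in range(1, N) if votes[:i].count('A') * 2 == i)
-- ===== Notes on version B (the rewrite author's own statement) =====
-- stated objective: alternative
-- what changed: Drops A's incremental two-counter state entirely: B tests each prefix independently, recounting 'A' in votes[:i] with slice.count and checking 2*count == i, trading A's O(N) single pass for an O(N^2) stateless brute force.
import Mathlib
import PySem

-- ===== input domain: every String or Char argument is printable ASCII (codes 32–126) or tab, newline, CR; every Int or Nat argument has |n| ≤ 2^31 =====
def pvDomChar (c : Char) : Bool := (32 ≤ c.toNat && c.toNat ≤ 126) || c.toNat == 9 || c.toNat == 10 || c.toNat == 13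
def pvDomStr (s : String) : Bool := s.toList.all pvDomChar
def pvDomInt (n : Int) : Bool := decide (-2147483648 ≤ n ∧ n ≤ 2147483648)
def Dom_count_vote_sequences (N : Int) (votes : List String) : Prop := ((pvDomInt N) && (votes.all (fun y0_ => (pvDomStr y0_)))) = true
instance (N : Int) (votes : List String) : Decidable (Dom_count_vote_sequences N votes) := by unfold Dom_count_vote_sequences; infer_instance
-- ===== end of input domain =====

-- B replaces A's incremental two-counter scan with an independent brute-force recount of 'A' in each prefix slice (objective: alternative; slower, O(N^2) vs O(N)).

-- ===== PORT A =====
-- A's loop body: bump count_A or count_B, then bump result when they tie.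
def pvStepA (votes : List String) (st : Int × Int × Int) (i : Int) : Int × Int × Int :=
  let v := PySem.List.pyGetD votes (i - 1) ""  -- votes[i-1]; in range under Pre_
  let cA := if v = "A" then st.1 + 1 else st.1
  let cB := if v = "A" then st.2.1 else st.2.1 + 1
  (cA, cB, if cA = cB then st.2.2 + 1 else st.2.2)

-- A's loop over range(1, N), carrying (count_A, count_B, result).
def count_vote_sequences (N : Int) (votes : List String) : Int :=
  ((PySem.List.pyRange 1 N 1).foldl (pvStepA votes) (0, 0, 1)).2.2

-- ===== PORT B =====
-- B: 1 + sum(1 for i in range(1, N) if votes[:i].count('A') * 2 == i)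
-- (the 0/1-generator sum is a countP over the range)
def count_vote_sequences_alt (N : Int) (votes : List String) : Int :=
  1 + (((PySem.List.pyRange 1 N 1).countP
        (fun i => (PySem.List.count (PySem.List.slice votes none (some i)) "A" : Int) * 2 == i) : Nat) : Int)

-- ===== PRECONDITION & SPEC =====
-- Pre_ excludes exactly the inputs on which Python A raises IndexError: votes must cover indices 0..N-2.
def Pre_count_vote_sequences (N : Int) (votes : List String) : Prop := N ≤ (votes.length : Int) + 1
instance (N : Int) (votes : List String) : Decidable (Pre_count_vote_sequences N votes) := by unfold Pre_count_vote_sequences; infer_instance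
def pvWitness_count_vote_sequences : Int × List String := (4, ["A", "B", "A"])
def Spec_count_vote_sequences (N : Int) (votes : List String) (out : Int) : Prop := out = count_vote_sequences_alt N votes
instance (N : Int) (votes : List String) (out : Int) : Decidable (Spec_count_vote_sequences N votes out) := by unfold Spec_count_vote_sequences; infer_instance

-- ===== CLAIM =====
def Claim_equal_count_vote_sequences : Prop := ∀ (N : Int) (votes : List String), Dom_count_vote_sequences N votes → Pre_count_vote_sequences N votes → Spec_count_vote_sequences N votes (count_vote_sequences N votes)

-- ===== LEMMAS AND PROOFS =====

-- count of "A" in the first (m+1) gets grows by 1 exactly when votes[m] (padded "") is "A"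
theorem pvTakeCount (votes : List String) (m : Nat) :
    ((votes.take (m + 1)).count "A" : Int)
      = ((votes.take m).count "A" : Int) + (if votes.getD m "" = "A" then 1 else 0) := by
  rw [List.take_add_one, List.count_append]
  rcases h : votes[m]? with _ | v
  · have hd : votes.getD m "" = "" := by simp [List.getD, h]
    simp [h]
  · have hd : votes.getD m "" = v := by simp [List.getD, h]
    rw [hd]
    by_cases hv : v = "A" <;> simp [hv]

-- the loop invariant: after i = 1..m, A's state is (cA, m - cA, 1 + B's tally so far)
theorem pvInv (votes : List String) (m : Nat) :
    (PySem.List.pyRange 1 (1 + (m : Int)) 1).foldl (pvStepA votes) (0, 0, 1)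
      = (((votes.take m).count "A" : Int),
         (m : Int) - ((votes.take m).count "A" : Int),
         1 + (((PySem.List.pyRange 1 (1 + (m : Int)) 1).countP
              (fun i => (PySem.List.count (PySem.List.slice votes none (some i)) "A" : Int) * 2 == i) : Nat) : Int)) := by
  induction m with
  | zero => simp [PySem.List.pyRange_one_eq_nil (le_refl (1 : Int))]
  | succ m ih =>
    have hsplit : PySem.List.pyRange 1 (1 + ((m + 1 : Nat) : Int)) 1
        = PySem.List.pyRange 1 (1 + (m : Int)) 1 ++ [1 + (m : Int)] := by
      have : (1 : Int) + ((m + 1 : Nat) : Int) = (1 + (m : Int)) + 1 := by push_cast; ring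
      rw [this, PySem.List.pyRange_one_succ_right (by omega)]
    rw [hsplit, List.foldl_append, List.countP_append, ih]
    simp only [List.foldl_cons, List.foldl_nil, List.countP_cons, List.countP_nil, pvStepA]
    have hget : PySem.List.pyGetD votes (1 + (m : Int) - 1) "" = votes.getD m "" := by
      have : (1 : Int) + (m : Int) - 1 = ((m : Nat) : Int) := by push_cast; ring
      rw [this, PySem.List.pyGetD_natCast]
    have hslice : PySem.List.slice votes none (some (1 + (m : Int))) = votes.take (m + 1) := by
      have : (1 : Int) + (m : Int) = (((m + 1 : Nat) : Int)) := by push_cast; ring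
      rw [this, PySem.List.slice_to_natCast]
    have hc := pvTakeCount votes m
    rw [hget, hslice]
    have hcount : (PySem.List.count (votes.take (m+1)) "A" : Int) = ((votes.take (m+1)).count "A" : Int) := by
      simp [PySem.List.count_eq]
    by_cases hv : votes.getD m "" = "A"
    · simp only [hv, if_true]
      rw [if_pos hv] at hc
      simp only [Prod.mk.injEq]
      refine ⟨by omega, by push_cast; omega, ?_⟩
      · by_cases htie : ((votes.take m).count "A" : Int) + 1 = (m : Int) - ((votes.take m).count "A" : Int)
        · rw [if_pos htie]
          have : ((PySem.List.count (votes.take (m+1)) "A" : Int) * 2 == 1 + (m : Int)) = true := by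
            rw [hcount]; simp only [beq_iff_eq]; omega
          simp only [this]; push_cast; omega
        · rw [if_neg htie]
          have : ((PySem.List.count (votes.take (m+1)) "A" : Int) * 2 == 1 + (m : Int)) = false := by
            rw [hcount]; simp only [beq_eq_false_iff_ne, ne_eq]; omega
          simp only [this]; push_cast; omega
    · simp only [hv, if_false]
      rw [if_neg hv] at hc
      simp only [Prod.mk.injEq]
      refine ⟨by omega, by push_cast; omega, ?_⟩
      · by_cases htie : ((votes.take m).count "A" : Int) = (m : Int) - ((votes.take m).count "A" : Int) + 1
        · rw [if_pos htie]
          have : ((PySem.List.count (votes.take (m+1)) "A" : Int) * 2 == 1 + (m : Int)) = true := by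
            rw [hcount]; simp only [beq_iff_eq]; omega
          simp only [this]; push_cast; omega
        · rw [if_neg htie]
          have : ((PySem.List.count (votes.take (m+1)) "A" : Int) * 2 == 1 + (m : Int)) = false := by
            rw [hcount]; simp only [beq_eq_false_iff_ne, ne_eq]; omega
          simp only [this]; push_cast; omega

-- ===== VERDICT =====
theorem count_vote_sequences_spec : Claim_equal_count_vote_sequences := by
  intro N votes _ _
  unfold Spec_count_vote_sequences count_vote_sequences count_vote_sequences_alt
  by_cases hN : N ≤ 1
  · rw [PySem.List.pyRange_one_eq_nil hN]; simp
  · have hm : N = 1 + ((N - 1).toNat : Int) := by omega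
    rw [hm, pvInv]
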